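-- pv_equiv track=rewrite | github.com/OrbitWon45/git_hw | home_assignment_4.py | sum_between_range
-- ===== SOURCE A (Python) =====
-- def sum_between_range(arr: list, min_val: int, max_val: int):
--     arr.sort()
--     result = 0
--     r_list = []
--     for i in range(len(arr)):
--         if min_val <= arr[i] <= max_val:
--             result += arr[i]
--             r_list.append(arr[i])
--     return f'{result}, {tuple(r_list)}'
-- ===== SOURCE B (Python) =====
-- def _bisect_left(a, x):
--     lo, hi = 0, len(a)
--     while lo < hi:
--         mid = (lo + hi) // 2
--         if a[mid] < x:
--             lo = mid + 1
--         else: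
--             hi = mid
--     return lo
--
--
-- def _bisect_right(a, x):
--     lo, hi = 0, len(a)
--     while lo < hi:
--         mid = (lo + hi) // 2
--         if x < a[mid]:
--             hi = mid
--         else:
--             lo = mid + 1
--     return lo
--
--
-- def sum_between_range(arr: list, min_val: int, max_val: int):
--     arr.sort()
--     lo = _bisect_left(arr, min_val)
--     hi = _bisect_right(arr, max_val)
--     sub = arr[lo:hi]
--     return f'{sum(sub)}, {tuple(sub)}'
-- ===== Notes on version B (the rewrite author's own statement) =====
-- stated objective: idiomatic
-- what changed: Instead of scanning every element of the sorted array with a range test, B locates the contiguous in-range block with two binary searches (bisect_left/bisect_right) and slices it, summing the slice.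
import Mathlib
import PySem

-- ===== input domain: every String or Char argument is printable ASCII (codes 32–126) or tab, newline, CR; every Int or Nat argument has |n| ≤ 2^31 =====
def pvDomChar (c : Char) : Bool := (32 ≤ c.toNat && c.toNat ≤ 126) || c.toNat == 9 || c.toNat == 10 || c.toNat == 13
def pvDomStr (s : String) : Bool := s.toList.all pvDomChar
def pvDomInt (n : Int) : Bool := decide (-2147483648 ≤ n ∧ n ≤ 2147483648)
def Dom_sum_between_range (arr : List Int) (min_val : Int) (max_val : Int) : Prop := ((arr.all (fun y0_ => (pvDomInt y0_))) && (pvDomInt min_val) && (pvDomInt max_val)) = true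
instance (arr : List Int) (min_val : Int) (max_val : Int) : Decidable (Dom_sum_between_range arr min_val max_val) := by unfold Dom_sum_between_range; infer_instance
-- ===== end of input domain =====

-- B replaces A's per-element linear scan of the sorted array by two binary searches (bisect_left /
-- bisect_right) locating the in-range block, then slices it: more idiomatic; both sort arr in place
-- (same mutation side effect), the equivalence proved is about the return value.


-- shared helper: Python's str(tuple_of_ints) — "()", "(x,)", "(x, y, …)"
def pyTupleRepr (xs : List Int) : String :=
  match xs with
  | [] => "()"
  | [x] => PySem.Str.join "" ["(", PySem.Int.toStr x, ",)"]
  | _ => PySem.Str.join "" ["(", PySem.Str.join ", " (xs.map PySem.Int.toStr), ")"]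

-- ===== PORT A =====
def sum_between_range (arr : List Int) (min_val : Int) (max_val : Int) : String :=
  let s := PySem.List.sorted arr (fun x => x) false          -- arr.sort()
  let st := (PySem.List.pyRange 0 (s.length : Int) 1).foldl  -- for i in range(len(arr)):
      (fun (acc : Int × List Int) i =>
        if min_val ≤ PySem.List.pyGetD s i 0 ∧ PySem.List.pyGetD s i 0 ≤ max_val then
          (acc.1 + PySem.List.pyGetD s i 0, acc.2 ++ [PySem.List.pyGetD s i 0])
        else acc)
      (0, [])                                                -- (result, r_list)
  PySem.Str.join ", " [PySem.Int.toStr st.1, pyTupleRepr st.2]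

-- ===== PORT B =====
-- Source B's hand-written _bisect_left/_bisect_right are literally CPython's bisect loops,
-- which are PySem.List.bisectLeft / bisectRight
def sum_between_range_alt (arr : List Int) (min_val : Int) (max_val : Int) : String :=
  let s := PySem.List.sorted arr (fun x => x) false
  let lo := PySem.List.bisectLeft s min_val
  let hi := PySem.List.bisectRight s max_val
  let sub := PySem.List.slice s (some (lo : Int)) (some (hi : Int))
  PySem.Str.join ", " [PySem.Int.toStr sub.sum, pyTupleRepr sub]

-- ===== PRECONDITION & SPEC =====
def Spec_sum_between_range (arr : List Int) (min_val : Int) (max_val : Int) (out : String) : Prop := out = sum_between_range_alt arr min_val max_val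
instance (arr : List Int) (min_val : Int) (max_val : Int) (out : String) : Decidable (Spec_sum_between_range arr min_val max_val out) := by unfold Spec_sum_between_range; infer_instance

-- ===== CLAIM (what is proved, stated in full; the proofs are below) =====
def Claim_equal_sum_between_range : Prop := ∀ (arr : List Int) (min_val : Int) (max_val : Int), Dom_sum_between_range arr min_val max_val → Spec_sum_between_range arr min_val max_val (sum_between_range arr min_val max_val)

-- ===== LEMMAS AND PROOFS =====

-- A's loop collects (sum of the in-range elements, the in-range elements)
lemma foldl_collect (m M : Int) (l : List Int) : ∀ (r : Int) (acc : List Int),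
    l.foldl (fun (a : Int × List Int) v => if m ≤ v ∧ v ≤ M then (a.1 + v, a.2 ++ [v]) else a) (r, acc)
      = (r + (l.filter (fun v => decide (m ≤ v ∧ v ≤ M))).sum,
         acc ++ l.filter (fun v => decide (m ≤ v ∧ v ≤ M))) := by
  induction l with
  | nil => simp
  | cons x t ih =>
    intro r acc
    by_cases hx : m ≤ x ∧ x ≤ M
    · simp [hx, ih]; ring
    · simp [hx, ih]

-- on a sorted list, the in-range elements are exactly the bisect-delimited block
lemma filter_between_eq_block (s : List Int) (m M : Int) (hs : s.Pairwise (· ≤ ·)) :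
    s.filter (fun v => decide (m ≤ v ∧ v ≤ M))
      = (s.drop (PySem.List.bisectLeft s m)).take (PySem.List.bisectRight s M - PySem.List.bisectLeft s m) := by
  obtain ⟨hloL, hlo1, hlo2⟩ := PySem.List.bisectLeft_spec s m hs
  obtain ⟨hhiL, hhi1, hhi2⟩ := PySem.List.bisectRight_spec s M hs
  set lo := PySem.List.bisectLeft s m with hlodef
  set hi := PySem.List.bisectRight s M with hhidef
  by_cases hlh : lo ≤ hi
  · have hdrop : s.drop lo = (s.drop lo).take (hi - lo) ++ s.drop hi := by
      conv_lhs => rw [← List.take_append_drop (hi - lo) (s.drop lo)]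
      rw [List.drop_drop]
      congr 2
      omega
    conv_lhs => rw [← List.take_append_drop lo s, hdrop]
    rw [List.filter_append, List.filter_append]
    have f1 : (s.take lo).filter (fun v => decide (m ≤ v ∧ v ≤ M)) = [] := by
      rw [List.filter_eq_nil_iff]
      intro a ha
      obtain ⟨i, hi1, hi2⟩ := List.mem_iff_getElem.mp ha
      simp [List.length_take] at hi1
      have hilt : i < lo := by omega
      have hlen : i < s.length := by omega
      have : s[i] < m := hlo1 i hlen hilt
      rw [List.getElem_take] at hi2
      simp [← hi2]
      omega
    have f3 : (s.drop hi).filter (fun v => decide (m ≤ v ∧ v ≤ M)) = [] := by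
      rw [List.filter_eq_nil_iff]
      intro a ha
      obtain ⟨k, hk1, hk2⟩ := List.mem_iff_getElem.mp ha
      rw [List.getElem_drop] at hk2
      have hlen : hi + k < s.length := by simp [List.length_drop] at hk1; omega
      have : M < s[hi + k] := hhi2 (hi + k) hlen (by omega)
      simp [← hk2]
      omega
    have f2 : ((s.drop lo).take (hi - lo)).filter (fun v => decide (m ≤ v ∧ v ≤ M))
        = (s.drop lo).take (hi - lo) := by
      rw [List.filter_eq_self]
      intro a ha
      obtain ⟨k, hk1, hk2⟩ := List.mem_iff_getElem.mp ha
      rw [List.getElem_take, List.getElem_drop] at hk2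
      have hkb : k < hi - lo := by simp [List.length_take] at hk1; omega
      have hlen : lo + k < s.length := by
        simp [List.length_take, List.length_drop] at hk1; omega
      have h1 : m ≤ s[lo + k] := hlo2 (lo + k) hlen (by omega)
      have h2 : s[lo + k] ≤ M := hhi1 (lo + k) hlen (by omega)
      simp [← hk2]
      omega
    rw [f1, f2, f3]
    simp
  · -- hi < lo: the block is empty and no element is in range
    have ht : hi - lo = 0 := by omega
    rw [ht]
    simp only [List.take_zero]
    rw [List.filter_eq_nil_iff]
    intro a ha
    obtain ⟨j, hj1, hj2⟩ := List.mem_iff_getElem.mp ha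
    by_cases hjlo : j < lo
    · have : s[j] < m := hlo1 j hj1 hjlo
      simp [← hj2]; omega
    · have : M < s[j] := hhi2 j hj1 (by omega)
      simp [← hj2]; omega

-- ===== VERDICT (by name: the statement is the Claim_ definition above) =====
theorem sum_between_range_spec : Claim_equal_sum_between_range := by
  intro arr m M _
  unfold Spec_sum_between_range sum_between_range sum_between_range_alt
  have hs : (PySem.List.sorted arr (fun x => x) false).Pairwise (· ≤ ·) :=
    PySem.List.sorted_pairwise arr (fun x => x)
  set s := PySem.List.sorted arr (fun x => x) false with hsdef
  dsimp only
  rw [PySem.List.foldl_pyRange_zero_pyGetD' s 0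
      (fun (a : Int × List Int) v => if m ≤ v ∧ v ≤ M then (a.1 + v, a.2 ++ [v]) else a) (0, [])]
  rw [foldl_collect m M s 0 [], PySem.List.slice_natCast,
      ← filter_between_eq_block s m M hs]
  simp
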